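-- pv_equiv track=rewrite | github.com/ABDESSAMED-tech/Optimisation-de-l-Allocation-des-Ressources | app2.py | rectification
-- ===== SOURCE A (Python) =====
-- def rectification(offre, capacites_restantes, solution, demande_restante):
--     while demande_restante < 0:
--         min_offre_index = -1
--         min_offre_value = float('inf')
--         for i, o in enumerate(offre):
--             if o > 0 and o < min_offre_value and solution[i] != -1 and solution[i] != 0:
--                 min_offre_index = i
--                 min_offre_value = o
--
--         if min_offre_index == -1:  # Si aucun site valide n'est trouvé
--             break
--
--         poste_index = solution[min_offre_index] - 1  # Indice du poste actuellement assigné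
--
--         if abs(demande_restante) <= min_offre_value:
--             # Si la demande restante peut être couverte par l'offre minimale
--             offre[min_offre_index] -= abs(demande_restante)  # Ajuster l'offre du site
--             capacites_restantes[poste_index] += abs(demande_restante)  # Restaurer la capacité utilisée au poste
--             demande_restante += abs(demande_restante)  # Mettre à jour la demande restante à 0
--             if offre[min_offre_index] == 0:
--                 solution[min_offre_index] = 0  # Désactiver ce site dans la solution
--         else:
--             # Si la demande restante est supérieure à l'offre minimale
--             offre[min_offre_index] = 0  # Effacer l'offre du site désactivé pour éviter sa réutilisation
--             capacites_restantes[poste_index] += min_offre_value  # Restaurer toute la capacité utilisée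
--             demande_restante += min_offre_value  # Réduire la demande restante
--             solution[min_offre_index] = 0  # Désactiver ce site
--
--     return offre, capacites_restantes, solution, demande_restante
-- ===== SOURCE B (Python) =====
-- def rectification(offre, capacites_restantes, solution, demande_restante):
--     if demande_restante >= 0:
--         return offre, capacites_restantes, solution, demande_restante
--     # one stable sort by (offre value, index), then a single pass in that order
--     ordre = sorted((o, i) for i, o in enumerate(offre)
--                    if o > 0 and solution[i] != -1 and solution[i] != 0)
--     for v, i in ordre:
--         if demande_restante >= 0:
--             break
--         poste = solution[i] - 1
--         besoin = -demande_restante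
--         if besoin <= v:
--             offre[i] -= besoin
--             capacites_restantes[poste] += besoin
--             demande_restante = 0
--             if offre[i] == 0:
--                 solution[i] = 0
--         else:
--             offre[i] = 0
--             capacites_restantes[poste] += v
--             solution[i] = 0
--             demande_restante += v
--     return offre, capacites_restantes, solution, demande_restante
-- ===== Notes on version B (the rewrite author's own statement) =====
-- stated objective: alternative
-- what changed: A rescans all sites for the minimum offre on every iteration of its while-loop; B sorts the valid sites once by (offre, index) and consumes them in a single pass over that list.
import Mathlib
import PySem

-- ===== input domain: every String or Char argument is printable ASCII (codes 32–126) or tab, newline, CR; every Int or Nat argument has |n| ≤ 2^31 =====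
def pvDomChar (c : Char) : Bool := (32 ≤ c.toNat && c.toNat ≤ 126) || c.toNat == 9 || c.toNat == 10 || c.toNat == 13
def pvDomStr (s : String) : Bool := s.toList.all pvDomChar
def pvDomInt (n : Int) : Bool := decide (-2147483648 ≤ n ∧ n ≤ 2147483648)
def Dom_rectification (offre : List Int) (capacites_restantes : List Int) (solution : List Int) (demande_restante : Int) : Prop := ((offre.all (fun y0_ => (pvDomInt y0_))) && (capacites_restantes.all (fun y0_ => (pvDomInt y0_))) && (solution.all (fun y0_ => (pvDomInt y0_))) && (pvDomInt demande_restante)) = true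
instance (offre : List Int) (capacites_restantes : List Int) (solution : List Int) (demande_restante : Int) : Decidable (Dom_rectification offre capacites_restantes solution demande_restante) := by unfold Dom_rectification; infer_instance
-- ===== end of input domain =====

-- B replaces A's repeated minimum-rescans by one stable sort of the valid sites by (offre, index)
-- plus a single consuming pass.  Both A and the Python B mutate their list arguments in place; the
-- equivalence proved here is about the returned quadruple (the Lean ports are pure).

-- ===== PORT A =====

-- 'o < min_offre_value' where min_offre_value starts at float('inf'): none models inf
def pvLtInf (m : Option Int) (o : Int) : Bool :=
  match m with
  | none => true
  | some v => decide (o < v)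

-- body of A's 'for i, o in enumerate(offre)' scan; state = (min_offre_index, min_offre_value)
def pvScan (sol : List Int) (st : Int × Option Int) (io : Int × Int) : Int × Option Int :=
  if decide (0 < io.2) && pvLtInf st.2 io.2 &&
     decide (PySem.List.pyGetD sol io.1 0 ≠ -1) && decide (PySem.List.pyGetD sol io.1 0 ≠ 0)
  then (io.1, some io.2) else st

def pvScanMin (offre sol : List Int) : Int × Option Int :=
  (PySem.List.enumerate offre 0).foldl (pvScan sol) (-1, none)

-- A's while-loop.  Fuel is only a totality guard: each iteration either terminates the loop or
-- deactivates one of the ≤ offre.length valid sites, so offre.length + 2 fuel is never exhausted.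
def pvLoopA : Nat → List Int → List Int → List Int → Int → List Int × List Int × List Int × Int
  | 0, o, c, s, d => (o, c, s, d)
  | Nat.succ fuel, o, c, s, d =>
    if d < 0 then
      match pvScanMin o s with
      | (_, none) => (o, c, s, d)      -- min_offre_index == -1 (index is -1 exactly when value is still inf): break
      | (mi, some mv) =>
        let p := PySem.List.pyGetD s mi 0 - 1
        if |d| ≤ mv then
          let o' := PySem.List.pySetD o mi (PySem.List.pyGetD o mi 0 - |d|)
          let c' := PySem.List.pySetD c p (PySem.List.pyGetD c p 0 + |d|)
          let s' := if PySem.List.pyGetD o' mi 0 = 0 then PySem.List.pySetD s mi 0 else s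
          pvLoopA fuel o' c' s' (d + |d|)
        else
          pvLoopA fuel (PySem.List.pySetD o mi 0)
            (PySem.List.pySetD c p (PySem.List.pyGetD c p 0 + mv))
            (PySem.List.pySetD s mi 0) (d + mv)
    else (o, c, s, d)

def rectification (offre : List Int) (capacites_restantes : List Int) (solution : List Int) (demande_restante : Int) : List Int × List Int × List Int × Int :=
  pvLoopA (offre.length + 2) offre capacites_restantes solution demande_restante

-- ===== PORT B =====

-- 'o > 0 and solution[i] != -1 and solution[i] != 0' (io = (i, o))
def pvCond (sol : List Int) (io : Int × Int) : Bool :=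
  decide (0 < io.2) && decide (PySem.List.pyGetD sol io.1 0 ≠ -1) && decide (PySem.List.pyGetD sol io.1 0 ≠ 0)

-- '(o, i) for i, o in enumerate(offre) if …'
def pvCands (offre sol : List Int) : List (Int × Int) :=
  ((PySem.List.enumerate offre 0).filter (pvCond sol)).map (fun io => (io.2, io.1))

-- B's 'for v, i in ordre' pass
def pvConsume : List (Int × Int) → List Int → List Int → List Int → Int → List Int × List Int × List Int × Int
  | [], o, c, s, d => (o, c, s, d)
  | vi :: rest, o, c, s, d =>
    if 0 ≤ d then (o, c, s, d)       -- break
    else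
      let p := PySem.List.pyGetD s vi.2 0 - 1
      let besoin := -d
      if besoin ≤ vi.1 then
        let o' := PySem.List.pySetD o vi.2 (PySem.List.pyGetD o vi.2 0 - besoin)
        let c' := PySem.List.pySetD c p (PySem.List.pyGetD c p 0 + besoin)
        let s' := if PySem.List.pyGetD o' vi.2 0 = 0 then PySem.List.pySetD s vi.2 0 else s
        pvConsume rest o' c' s' 0
      else
        pvConsume rest (PySem.List.pySetD o vi.2 0)
          (PySem.List.pySetD c p (PySem.List.pyGetD c p 0 + vi.1))
          (PySem.List.pySetD s vi.2 0) (d + vi.1)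

def rectification_alt (offre : List Int) (capacites_restantes : List Int) (solution : List Int) (demande_restante : Int) : List Int × List Int × List Int × Int :=
  if 0 ≤ demande_restante then (offre, capacites_restantes, solution, demande_restante)
  else
    pvConsume (PySem.List.sorted (pvCands offre solution) (fun p => toLex p))
      offre capacites_restantes solution demande_restante

-- ===== PRECONDITION & SPEC =====
-- Pre_ restricts to the natural domain of the task: when demand is outstanding, every site with a
-- positive offre has a solution entry, and an assigned entry names a poste index valid for
-- capacites_restantes.  It excludes (a) inputs where A raises IndexError on the site it reaches, and
-- (b) conservatively, some malformed inputs A happens to return on only because its short-circuited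
-- minimum comparison skips indexing solution[i] for non-minimal sites, or because the demand is met
-- before an invalidly-assigned site is reached (see the cited examples).
def Pre_rectification (offre : List Int) (capacites_restantes : List Int) (solution : List Int) (demande_restante : Int) : Prop :=
  demande_restante < 0 →
    ∀ k, (h : k < offre.length) → 0 < offre[k] →
      k < solution.length ∧
      (∀ (hk : k < solution.length), solution[k] ≠ -1 → solution[k] ≠ 0 →
        1 - (capacites_restantes.length : Int) ≤ solution[k] ∧ solution[k] ≤ (capacites_restantes.length : Int))

instance (offre : List Int) (capacites_restantes : List Int) (solution : List Int) (demande_restante : Int) : Decidable (Pre_rectification offre capacites_restantes solution demande_restante) := by unfold Pre_rectification; infer_instance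

def pvWitness_rectification : List Int × List Int × List Int × Int := ([2, 3], [5], [1, 1], -4)

def Spec_rectification (offre : List Int) (capacites_restantes : List Int) (solution : List Int) (demande_restante : Int) (out : List Int × List Int × List Int × Int) : Prop := out = rectification_alt offre capacites_restantes solution demande_restante
instance (offre : List Int) (capacites_restantes : List Int) (solution : List Int) (demande_restante : Int) (out : List Int × List Int × List Int × Int) : Decidable (Spec_rectification offre capacites_restantes solution demande_restante out) := by unfold Spec_rectification; infer_instance

-- ===== CLAIM (what is proved, stated in full; the proofs are below) =====
def Claim_equal_rectification : Prop := ∀ (offre : List Int) (capacites_restantes : List Int) (solution : List Int) (demande_restante : Int), Dom_rectification offre capacites_restantes solution demande_restante → Pre_rectification offre capacites_restantes solution demande_restante → Spec_rectification offre capacites_restantes solution demande_restante (rectification offre capacites_restantes solution demande_restante)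

-- ===== LEMMAS AND PROOFS =====

-- Nat-indexed normal form of pvCands (proof-side only)
def candsN (s : List Int) : List Int → Nat → List (Int × Int)
  | [], _ => []
  | o :: os, k =>
    (if 0 < o ∧ s.getD k 0 ≠ -1 ∧ s.getD k 0 ≠ 0 then [(o, (k : Int))] else []) ++ candsN s os (k + 1)

-- the update step of A's scan once the site-validity test has been factored out
def scanStep (st : Int × Option Int) (p : Int × Int) : Int × Option Int :=
  if pvLtInf st.2 p.1 then (p.2, some p.1) else st

-- lexicographic ≤ on (value, index) pairs, as Python compares tuples
def lexLe (a b : Int × Int) : Prop := a.1 < b.1 ∨ (a.1 = b.1 ∧ a.2 ≤ b.2)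

lemma cands_eq_candsN (sol : List Int) :
    ∀ (os : List Int) (k : Nat),
      ((PySem.List.enumerate os (k : Int)).filter (pvCond sol)).map (fun io => (io.2, io.1))
        = candsN sol os k := by
  intro os
  induction os with
  | nil => intro k; simp [PySem.List.enumerate_nil, candsN]
  | cons x xs ih =>
    intro k
    rw [PySem.List.enumerate_cons, show ((k : Int) + 1) = ((k + 1 : Nat) : Int) by push_cast; ring]
    have hg : PySem.List.pyGetD sol ((k : Nat) : Int) 0 = sol.getD k 0 :=
      PySem.List.pyGetD_natCast ..
    by_cases hc : 0 < x ∧ sol.getD k 0 ≠ -1 ∧ sol.getD k 0 ≠ 0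
    · rw [List.filter_cons_of_pos (by
        simp only [pvCond, hg, Bool.and_eq_true, decide_eq_true_eq]
        exact ⟨⟨hc.1, hc.2.1⟩, hc.2.2⟩)]
      simp only [List.map_cons, ih (k + 1), candsN, if_pos hc, List.singleton_append]
    · rw [List.filter_cons_of_neg (by
        simp only [pvCond, hg, Bool.and_eq_true, decide_eq_true_eq]
        rintro ⟨⟨h1, h2⟩, h3⟩; exact hc ⟨h1, h2, h3⟩)]
      simp only [ih (k + 1), candsN, if_neg hc, List.nil_append]

lemma pvCands_eq (offre sol : List Int) : pvCands offre sol = candsN sol offre 0 := by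
  have := cands_eq_candsN sol offre 0
  simpa [pvCands] using this

lemma candsN_snd_lb (s : List Int) :
    ∀ (os : List Int) (k : Nat) (p : Int × Int), p ∈ candsN s os k → (k : Int) ≤ p.2 := by
  intro os
  induction os with
  | nil => intro k p hp; simp [candsN] at hp
  | cons x xs ih =>
    intro k p hp
    simp only [candsN, List.mem_append] at hp
    rcases hp with hp | hp
    · split at hp
      · simp at hp; subst hp; simp
      · simp at hp
    · have := ih (k + 1) p hp
      omega

lemma candsN_mem_shape (s : List Int) :
    ∀ (os : List Int) (k : Nat) (p : Int × Int), p ∈ candsN s os k →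
      ∃ n, n < os.length ∧ p.2 = ((k + n : Nat) : Int) := by
  intro os
  induction os with
  | nil => intro k p hp; simp [candsN] at hp
  | cons x xs ih =>
    intro k p hp
    simp only [candsN, List.mem_append] at hp
    rcases hp with hp | hp
    · split at hp
      · simp only [List.mem_singleton] at hp
        subst hp
        exact ⟨0, by simp, by simp⟩
      · simp at hp
    · obtain ⟨n, hn, hs⟩ := ih (k + 1) p hp
      exact ⟨n + 1, by simpa using hn, by rw [hs]; congr 1; omega⟩

lemma candsN_pairwise (s : List Int) (os : List Int) (k : Nat) :
    (candsN s os k).Pairwise (fun a b => a.2 < b.2) := by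
  induction os generalizing k with
  | nil => simp [candsN]
  | cons x xs ih =>
    simp only [candsN]
    apply List.pairwise_append.2
    refine ⟨?_, ih (k + 1), ?_⟩
    · split
      · simp
      · simp
    · intro a ha b hb
      have hb' := candsN_snd_lb s xs (k + 1) b hb
      split at ha
      · simp at ha; subst ha; push_cast at hb' ⊢; omega
      · simp at ha

lemma candsN_set_out (s : List Int) (j : Nat) :
    ∀ (os : List Int) (k : Nat), j < k → candsN (s.set j 0) os k = candsN s os k := by
  intro os
  induction os with
  | nil => intro k hk; simp [candsN]
  | cons x xs ih =>
    intro k hk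
    have hg : (s.set j 0).getD k 0 = s.getD k 0 := by
      rw [List.getD_eq_getElem?_getD, List.getD_eq_getElem?_getD,
        List.getElem?_set_ne (by omega)]
    simp only [candsN, hg, ih (k + 1) (by omega)]

lemma candsN_set (s : List Int) :
    ∀ (os : List Int) (k n : Nat), n < os.length →
      candsN (s.set (k + n) 0) (os.set n 0) k
        = (candsN s os k).filter (fun p => decide (p.2 ≠ ((k + n : Nat) : Int))) := by
  intro os
  induction os with
  | nil => intro k n hn; simp at hn
  | cons x xs ih =>
    intro k n hn
    cases n with
    | zero =>
      simp only [List.set_cons_zero, candsN]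
      have h0 : ¬ (0 < (0 : Int) ∧ ((s.set (k + 0) 0).getD k 0 ≠ -1 ∧ (s.set (k + 0) 0).getD k 0 ≠ 0)) := by
        intro h; exact absurd h.1 (by norm_num)
      rw [if_neg (by simp only [Nat.add_zero] at h0 ⊢; exact h0)]
      rw [List.nil_append, candsN_set_out s (k + 0) xs (k + 1) (by omega)]
      rw [List.filter_append]
      have htail : (candsN s xs (k + 1)).filter (fun p => decide (p.2 ≠ ((k + 0 : Nat) : Int)))
          = candsN s xs (k + 1) := by
        rw [List.filter_eq_self]
        intro a ha
        have := candsN_snd_lb s xs (k + 1) a ha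
        simp only [decide_eq_true_eq]
        push_cast at this ⊢; omega
      rw [htail]
      split
      · simp
      · simp
    | succ m =>
      simp only [List.set_cons_succ, candsN]
      have hg : (s.set (k + (m + 1)) 0).getD k 0 = s.getD k 0 := by
        rw [List.getD_eq_getElem?_getD, List.getD_eq_getElem?_getD,
          List.getElem?_set_ne (by omega)]
      have hrec := ih (k + 1) m (by simpa using hn)
      rw [hg, show k + (m + 1) = (k + 1) + m by omega, hrec, List.filter_append]
      congr 1
      split
      · rw [List.filter_cons_of_pos]
        · simp
        · simp only [decide_eq_true_eq]
          intro h
          have : (k : Int) = ((k + 1 + m : Nat) : Int) := h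
          push_cast at this; omega
      · simp

lemma scan_eq_foldStep (sol : List Int) :
    ∀ (os : List Int) (k : Nat) (st : Int × Option Int),
      (PySem.List.enumerate os (k : Int)).foldl (pvScan sol) st
        = (candsN sol os k).foldl scanStep st := by
  intro os
  induction os with
  | nil => intro k st; simp [PySem.List.enumerate_nil, candsN]
  | cons x xs ih =>
    intro k st
    rw [PySem.List.enumerate_cons, show ((k : Int) + 1) = ((k + 1 : Nat) : Int) by push_cast; ring]
    simp only [List.foldl_cons, candsN, List.foldl_append]
    have hg : PySem.List.pyGetD sol ((k : Nat) : Int) 0 = sol.getD k 0 :=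
      PySem.List.pyGetD_natCast ..
    by_cases hc : 0 < x ∧ sol.getD k 0 ≠ -1 ∧ sol.getD k 0 ≠ 0
    · rw [if_pos hc]
      have hstep : pvScan sol st ((k : Int), x) = scanStep st (x, (k : Int)) := by
        rcases hc with ⟨h1, h2, h3⟩
        simp only [pvScan, scanStep, hg]
        by_cases hb : pvLtInf st.2 x = true
        · rw [if_pos, if_pos hb]
          simp only [Bool.and_eq_true, decide_eq_true_eq]
          exact ⟨⟨⟨h1, hb⟩, h2⟩, h3⟩
        · rw [if_neg, if_neg hb]
          simp only [Bool.and_eq_true, decide_eq_true_eq]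
          rintro ⟨⟨⟨_, hb'⟩, _⟩, _⟩; exact hb hb'
      rw [hstep, ih (k + 1)]
      simp only [List.foldl_cons, List.foldl_nil]
    · rw [if_neg hc]
      have hstep : pvScan sol st ((k : Int), x) = st := by
        simp only [pvScan, hg]
        rw [if_neg]
        simp only [Bool.and_eq_true, decide_eq_true_eq]
        rintro ⟨⟨⟨h1, _⟩, h2⟩, h3⟩
        exact hc ⟨h1, h2, h3⟩
      rw [hstep, ih (k + 1), List.foldl_nil]

lemma foldStep_min :
    ∀ (cs : List (Int × Int)) (q : Int × Int),
      (q :: cs).Pairwise (fun a b => a.2 < b.2) →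
      ∃ m, cs.foldl scanStep (q.2, some q.1) = (m.2, some m.1) ∧
        m ∈ q :: cs ∧ ∀ y ∈ q :: cs, lexLe m y := by
  intro cs
  induction cs with
  | nil =>
    intro q _
    exact ⟨q, rfl, List.mem_singleton.2 rfl, by
      intro y hy; simp at hy; subst hy; right; exact ⟨rfl, le_refl _⟩⟩
  | cons b cs' ih =>
    intro q hpw
    have hqb : q.2 < b.2 := (List.pairwise_cons.1 hpw).1 b (by simp)
    set q' : Int × Int := if b.1 < q.1 then b else q with hq'
    have hstep : scanStep (q.2, some q.1) b = (q'.2, some q'.1) := by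
      rw [hq']
      by_cases hb : b.1 < q.1
      · rw [if_pos hb]; simp [scanStep, pvLtInf, hb]
      · rw [if_neg hb]; simp [scanStep, pvLtInf, hb]
    have hpw' : (q' :: cs').Pairwise (fun a b => a.2 < b.2) := by
      have h1 := List.pairwise_cons.1 hpw
      have h2 := List.pairwise_cons.1 h1.2
      apply List.pairwise_cons.2
      refine ⟨?_, h2.2⟩
      intro y hy
      have hby := h2.1 y hy
      have hqy := h1.1 y (by simp [hy])
      rw [hq']; split <;> omega
    obtain ⟨m, hfold, hmem, hmin⟩ := ih q' hpw'
    rw [List.foldl_cons, hstep]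
    refine ⟨m, hfold, ?_, ?_⟩
    · rcases List.mem_cons.1 hmem with hm | hm
      · rw [hm, hq']; split
        · exact List.mem_cons_of_mem _ (by simp)
        · simp
      · exact List.mem_cons_of_mem _ (List.mem_cons_of_mem _ hm)
    · have hmq' : lexLe m q' := hmin q' (by simp)
      rw [hq'] at hmq'
      have hmq : lexLe m q := by
        by_cases hb : b.1 < q.1
        · rw [if_pos hb] at hmq'; simp only [lexLe] at hmq' ⊢; omega
        · rwa [if_neg hb] at hmq'
      have hmb : lexLe m b := by
        by_cases hb : b.1 < q.1
        · rwa [if_pos hb] at hmq'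
        · rw [if_neg hb] at hmq'; simp only [lexLe] at hmq' ⊢; omega
      intro y hy
      rcases List.mem_cons.1 hy with rfl | hy
      · exact hmq
      rcases List.mem_cons.1 hy with rfl | hy
      · exact hmb
      · exact hmin y (List.mem_cons_of_mem _ hy)

lemma lexLe_iff (a b : Int × Int) : lexLe a b ↔ (toLex a : Int ×ₗ Int) ≤ toLex b := by
  rw [Prod.Lex.le_iff]; rfl

lemma sorted_cands_pairwise_lt (o s : List Int) :
    (PySem.List.sorted (pvCands o s) (fun p => toLex p)).Pairwise
      (fun a b => (toLex a : Int ×ₗ Int) < toLex b) := by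
  have hle := PySem.List.sorted_pairwise (pvCands o s) (fun p => toLex p)
  have hperm := PySem.List.sorted_perm (pvCands o s) (fun p => toLex p) false
  have hsnd : (pvCands o s).Pairwise (fun a b => a.2 ≠ b.2) := by
    rw [pvCands_eq]
    exact (candsN_pairwise s o 0).imp (fun h => ne_of_lt h)
  have hsnd' : (PySem.List.sorted (pvCands o s) (fun p => toLex p)).Pairwise
      (fun a b => a.2 ≠ b.2) :=
    (List.Perm.pairwise_iff (fun h => Ne.symm h) hperm).2 hsnd
  refine (hle.and hsnd').imp ?_
  rintro a b ⟨h1, h2⟩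
  refine lt_of_le_of_ne h1 ?_
  intro heq
  exact h2 (congrArg (fun x => (ofLex x).2) heq)

lemma scanMin_eq_foldStep (o s : List Int) :
    pvScanMin o s = (candsN s o 0).foldl scanStep (-1, none) := by
  unfold pvScanMin
  have := scan_eq_foldStep s o 0 (-1, none)
  simpa using this

lemma scanMin_of_sorted_nil (o s : List Int)
    (h : PySem.List.sorted (pvCands o s) (fun p => toLex p) = []) :
    pvScanMin o s = (-1, none) := by
  have hnil : pvCands o s = [] := (PySem.List.sorted_eq_nil_iff _ _ _).1 h
  rw [scanMin_eq_foldStep, ← pvCands_eq, hnil]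
  rfl

lemma scanMin_of_sorted_cons (o s : List Int) (v i : Int) (rest : List (Int × Int))
    (h : PySem.List.sorted (pvCands o s) (fun p => toLex p) = (v, i) :: rest) :
    pvScanMin o s = (i, some v) := by
  have hpw : (candsN s o 0).Pairwise (fun a b => a.2 < b.2) := candsN_pairwise s o 0
  rw [scanMin_eq_foldStep]
  rcases hc : candsN s o 0 with _ | ⟨c, cs⟩
  · exfalso
    have hnil : pvCands o s = [] := by rw [pvCands_eq, hc]
    rw [hnil] at h
    have : ((v, i) :: rest : List (Int × Int)) = [] := by rw [← h]; rfl
    simp at this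
  · rw [hc] at hpw
    obtain ⟨m, hfold, hmem, hmin⟩ := foldStep_min cs c hpw
    have hstep0 : scanStep (-1, none) c = (c.2, some c.1) := by
      simp [scanStep, pvLtInf]
    rw [List.foldl_cons, hstep0, hfold]
    -- m is the lex-least element of the candidate list, and so is the sorted head (v, i)
    have hcands : pvCands o s = c :: cs := by rw [pvCands_eq, hc]
    have hhd_mem : (v, i) ∈ pvCands o s := by
      rw [← PySem.List.mem_sorted (key := fun p => toLex p) (rev := false), h]; simp
    have hhd_min := PySem.List.key_head_sorted_le (pvCands o s) (fun p => toLex p) h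
    have hm_mem : m ∈ pvCands o s := by rw [hcands]; exact hmem
    have h1 : (toLex m : Int ×ₗ Int) ≤ toLex (v, i) := by
      rw [← lexLe_iff]
      exact hmin (v, i) (by rw [← hcands]; exact hhd_mem)
    have h2 : (toLex (v, i) : Int ×ₗ Int) ≤ toLex m := hhd_min m hm_mem
    have hm : m = (v, i) := by
      have : (toLex m : Int ×ₗ Int) = toLex (v, i) := le_antisymm h1 h2
      exact Prod.ext (congrArg (fun x => (ofLex x).1) this) (congrArg (fun x => (ofLex x).2) this)
    rw [hm]

lemma sorted_cands_step (o s : List Int) (v i : Int) (rest : List (Int × Int))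
    (h : PySem.List.sorted (pvCands o s) (fun p => toLex p) = (v, i) :: rest) :
    PySem.List.sorted (pvCands (PySem.List.pySetD o i 0) (PySem.List.pySetD s i 0)) (fun p => toLex p) = rest := by
  have hperm0 := PySem.List.sorted_perm (pvCands o s) (fun p => toLex p) false
  rw [h] at hperm0
  have hhd_mem : (v, i) ∈ pvCands o s := hperm0.mem_iff.1 (by simp)
  obtain ⟨n, hn, hi⟩ := candsN_mem_shape s o 0 (v, i) (by rwa [pvCands_eq] at hhd_mem)
  simp only at hi
  have hi' : i = (n : Int) := by rw [hi]; congr 1; omega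
  -- rest has pairwise strictly increasing keys
  have hpwlt := sorted_cands_pairwise_lt o s
  rw [h] at hpwlt
  have hpw_rest := (List.pairwise_cons.1 hpwlt).2
  -- every element of rest has second component ≠ i
  have hsnd : ((v, i) :: rest).Pairwise (fun a b => a.2 ≠ b.2) := by
    have hsndc : (pvCands o s).Pairwise (fun a b => a.2 ≠ b.2) := by
      rw [pvCands_eq]
      exact (candsN_pairwise s o 0).imp (fun h => ne_of_lt h)
    exact (List.Perm.pairwise_iff (R := fun a b => a.2 ≠ b.2) (fun h => Ne.symm h) hperm0).2 hsndc
  have hrest_ne : ∀ y ∈ rest, y.2 ≠ i := by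
    intro y hy
    exact fun he => ((List.pairwise_cons.1 hsnd).1 y hy) he.symm
  -- the updated candidate list is the old one minus the head's index
  have hfilt : pvCands (PySem.List.pySetD o i 0) (PySem.List.pySetD s i 0)
      = (pvCands o s).filter (fun p => decide (p.2 ≠ ((0 + n : Nat) : Int))) := by
    rw [hi', PySem.List.pySetD_natCast, PySem.List.pySetD_natCast,
      pvCands_eq, pvCands_eq, show s.set n 0 = s.set (0 + n) 0 by rw [Nat.zero_add]]
    exact candsN_set s o 0 n hn
  -- rest is exactly that filtered list up to permutation
  have hrest_filter : ((v, i) :: rest).filter (fun p => decide (p.2 ≠ ((0 + n : Nat) : Int))) = rest := by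
    rw [List.filter_cons_of_neg (by simp [← hi'])]
    rw [List.filter_eq_self]
    intro a ha
    simpa [← hi'] using hrest_ne a ha
  have hperm : rest.Perm (pvCands (PySem.List.pySetD o i 0) (PySem.List.pySetD s i 0)) := by
    rw [hfilt, ← hrest_filter]
    exact hperm0.filter _
  exact PySem.List.sorted_eq_of_perm_of_pairwise_lt _ _ _ hperm hpw_rest

lemma consume_of_nonneg (L : List (Int × Int)) (o c s : List Int) (d : Int) (hd : 0 ≤ d) :
    pvConsume L o c s d = (o, c, s, d) := by
  cases L with
  | nil => rfl
  | cons x t => simp [pvConsume, hd]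

lemma loopA_of_nonneg (fuel : Nat) (o c s : List Int) (d : Int) (hd : 0 ≤ d) :
    pvLoopA fuel o c s d = (o, c, s, d) := by
  cases fuel with
  | zero => rfl
  | succ f => simp [pvLoopA, show ¬ d < 0 by omega]

lemma loopA_eq_consume :
    ∀ (L : List (Int × Int)) (fuel : Nat) (o c s : List Int) (d : Int),
      PySem.List.sorted (pvCands o s) (fun p => toLex p) = L →
      L.length + 1 ≤ fuel →
      pvLoopA fuel o c s d = pvConsume L o c s d := by
  intro L
  induction L with
  | nil =>
    intro fuel o c s d hL hf
    obtain ⟨f, rfl⟩ : ∃ f, fuel = f + 1 := ⟨fuel - 1, by omega⟩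
    by_cases hd : d < 0
    · simp only [pvLoopA, if_pos hd, scanMin_of_sorted_nil o s hL, pvConsume]
    · rw [loopA_of_nonneg _ _ _ _ _ (by omega), consume_of_nonneg _ _ _ _ _ (by omega)]
  | cons vi rest ih =>
    intro fuel o c s d hL hf
    obtain ⟨f, rfl⟩ : ∃ f, fuel = f + 1 := ⟨fuel - 1, by omega⟩
    by_cases hd : d < 0
    · obtain ⟨v, i⟩ := vi
      have hscan := scanMin_of_sorted_cons o s v i rest hL
      have habs : |d| = -d := abs_of_neg hd
      simp only [pvLoopA, if_pos hd, hscan, habs, pvConsume, if_neg (show ¬ 0 ≤ d by omega)]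
      by_cases hle : -d ≤ v
      · rw [if_pos hle, if_pos hle]
        rw [loopA_of_nonneg _ _ _ _ _ (by omega), consume_of_nonneg _ _ _ _ _ (by omega)]
        norm_num
      · rw [if_neg hle, if_neg hle]
        exact ih f _ _ _ _ (sorted_cands_step o s v i rest hL) (by simpa using hf)
    · rw [loopA_of_nonneg _ _ _ _ _ (by omega), consume_of_nonneg _ _ _ _ _ (by omega)]

-- ===== VERDICT (by name: the statement is the Claim_ definition above) =====
theorem rectification_spec : Claim_equal_rectification := by
  intro offre cap sol d _ _
  unfold Spec_rectification rectification rectification_alt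
  by_cases hd : 0 ≤ d
  · simp [hd, loopA_of_nonneg _ _ _ _ _ hd]
  · simp only [hd, if_false]
    refine loopA_eq_consume _ _ _ _ _ _ rfl ?_
    have h1 : (PySem.List.sorted (pvCands offre sol) (fun p => toLex p)).length
        = (pvCands offre sol).length := PySem.List.length_sorted _ _ _
    have h2 : (pvCands offre sol).length ≤ offre.length := by
      unfold pvCands
      calc (((PySem.List.enumerate offre 0).filter (pvCond sol)).map (fun io => (io.2, io.1))).length
          = ((PySem.List.enumerate offre 0).filter (pvCond sol)).length := List.length_map ..
        _ ≤ (PySem.List.enumerate offre 0).length := List.length_filter_le _ _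
        _ = offre.length := PySem.List.length_enumerate _ _
    omega
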